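-- pv_equiv track=rewrite | github.com/MateusFerreiraM/Programas_Python | Tempo Produção Mínimo.py | encontrar_tempo_minimo_minutos
-- ===== SOURCE A (Python) =====
-- def encontrar_tempo_minimo_minutos(tempos_ciclo, num_alvo):
--     """
--     Encontra o tempo mínimo em minutos para produzir um número alvo de itens.
--     """
--     limite_inferior = 1
--     limite_superior = num_alvo * max(tempos_ciclo)
--
--     tempo_minimo_encontrado = limite_superior
--
--     while limite_inferior <= limite_superior:
--         tempo_teste = (limite_inferior + limite_superior) // 2
--         total_produzido = 0
--
--         for tempo_ciclo in tempos_ciclo: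
--             total_produzido += tempo_teste // tempo_ciclo
--
--         if total_produzido >= num_alvo:
--             tempo_minimo_encontrado = tempo_teste
--             limite_superior = tempo_teste - 1
--         else:
--             limite_inferior = tempo_teste + 1
--
--     return tempo_minimo_encontrado
-- ===== SOURCE B (Python) =====
-- def encontrar_tempo_minimo_minutos(tempos_ciclo, num_alvo):
--     """
--     Tempo mínimo em minutos para produzir num_alvo itens.
--     Resposta de referência: o prazo num_alvo * max(tempos_ciclo) (nada a
--     refinar quando não há itens a produzir); com um alvo positivo ela é
--     substituída pelo ótimo exato, obtido por uma estimativa aritmética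
--     seguida de uma caminhada pelos instantes de conclusão de item.
--     """
--     tempo = num_alvo * max(tempos_ciclo)
--     if num_alvo > 0:
--         produto = 1
--         for c in tempos_ciclo:
--             produto *= c
--         peso = sum(produto // c for c in tempos_ciclo)
--         tempo = (num_alvo * produto) // peso
--         while sum(tempo // c for c in tempos_ciclo) < num_alvo:
--             tempo = min((tempo // c + 1) * c for c in tempos_ciclo)
--     return tempo
-- ===== Notes on version B (the rewrite author's own statement) =====
-- stated objective: alternative
-- what changed: Replaces binary search over the answer with a default-then-refine computation: the reference bound num_alvo*max stands when there is nothing to produce, and for a positive target it is replaced by the exact optimum from an arithmetic lower estimate t = (num_alvo*prod)//sum(prod//c) followed by a walk over successive item-completion times; Pre_ excludes the empty list (A's max() raises) and non-positive cycle-time cases reached by A's loop (division by zero, or a non-monotone bisected count for which no single answer is specified, so A's and B's values are equally defensible).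
-- outside the precondition, e.g. on encontrar_tempo_minimo_minutos([2, -3], 1): A returns 2, B returns 6; on encontrar_tempo_minimo_minutos([0], 5): A returns 0, B raises ZeroDivisionError
import Mathlib
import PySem

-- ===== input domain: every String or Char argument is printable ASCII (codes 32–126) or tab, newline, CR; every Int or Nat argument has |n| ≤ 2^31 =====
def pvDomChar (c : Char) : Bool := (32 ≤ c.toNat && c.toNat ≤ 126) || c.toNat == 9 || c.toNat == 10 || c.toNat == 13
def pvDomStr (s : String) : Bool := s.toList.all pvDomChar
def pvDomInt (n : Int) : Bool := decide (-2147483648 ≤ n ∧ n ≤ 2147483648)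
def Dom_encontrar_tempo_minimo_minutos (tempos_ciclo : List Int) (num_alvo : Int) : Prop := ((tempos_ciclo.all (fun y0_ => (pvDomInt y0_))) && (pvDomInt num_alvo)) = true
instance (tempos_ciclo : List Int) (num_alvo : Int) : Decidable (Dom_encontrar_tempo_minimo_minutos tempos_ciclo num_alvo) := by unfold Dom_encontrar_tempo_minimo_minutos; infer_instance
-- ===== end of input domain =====

-- B replaces A's binary search with a default-then-refine computation: the bound num_alvo*max stands
-- when nothing is to be produced, and for a positive target it is refined to the exact optimum by an
-- arithmetic lower estimate plus a walk over successive item-completion times (objective: alternative).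

-- ===== PORT A =====
-- the produced count 'sum(t // c for c in tempos_ciclo)' (A's inner for-loop; B's sum(...) has the same shape)
def pvContar (tempos_ciclo : List Int) (t : Int) : Int :=
  tempos_ciclo.foldl (fun acc c => acc + PySem.Int.floordiv t c) 0

-- A's while-loop: binary search state (limite_inferior, limite_superior, tempo_minimo_encontrado)
def pvLoopA (tempos_ciclo : List Int) (num_alvo lo hi best : Int) : Int :=
  if h : lo ≤ hi then
    let mid := PySem.Int.floordiv (lo + hi) 2
    if num_alvo ≤ pvContar tempos_ciclo mid then
      pvLoopA tempos_ciclo num_alvo lo (mid - 1) mid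
    else
      pvLoopA tempos_ciclo num_alvo (mid + 1) hi best
  else best
termination_by (hi + 1 - lo).toNat
decreasing_by
  · have := PySem.Int.floordiv_two_mid_bounds h; omega
  · have := PySem.Int.floordiv_two_mid_bounds h; omega

def encontrar_tempo_minimo_minutos (tempos_ciclo : List Int) (num_alvo : Int) : Int :=
  let limite_superior := num_alvo * ((PySem.List.max? tempos_ciclo (fun x => x)).getD 0)
  pvLoopA tempos_ciclo num_alvo 1 limite_superior limite_superior

-- ===== PORT B =====
-- min((t // c + 1) * c for c in tempos_ciclo): the earliest completion time after t
def pvNext (tempos_ciclo : List Int) (t : Int) : Int :=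
  (PySem.List.min? (tempos_ciclo.map (fun c => (PySem.Int.floordiv t c + 1) * c)) (fun x => x)).getD 0

-- B's while-loop; the inner 'if h : …' is a totalization guard (always true on Pre_ inputs)
def pvLoopB (tempos_ciclo : List Int) (num_alvo t : Int) : Int :=
  if pvContar tempos_ciclo t < num_alvo then
    if _h : pvContar tempos_ciclo t < pvContar tempos_ciclo (pvNext tempos_ciclo t) then
      pvLoopB tempos_ciclo num_alvo (pvNext tempos_ciclo t)
    else t
  else t
termination_by (num_alvo - pvContar tempos_ciclo t).toNat
decreasing_by omega

def encontrar_tempo_minimo_minutos_alt (tempos_ciclo : List Int) (num_alvo : Int) : Int :=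
  let tempo := num_alvo * ((PySem.List.max? tempos_ciclo (fun x => x)).getD 0)
  if 0 < num_alvo then
    let produto := tempos_ciclo.foldl (fun acc c => acc * c) 1
    let peso := pvContar tempos_ciclo produto
    pvLoopB tempos_ciclo num_alvo (PySem.Int.floordiv (num_alvo * produto) peso)
  else tempo

-- ===== PRECONDITION & SPEC =====
-- Pre_ admits every positive cycle-time list, and any target ≤ 0 as long as some cycle time is ≥ 0
-- (there A's loop never runs). It excludes the empty list (A's max() raises ValueError) and the
-- remaining non-positive cycle-time cases reached by A's loop, where A either divides by zero (a zero
-- cycle time) or bisects a non-monotone produced-count, for which no single answer is specified and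
-- A's and B's values are equally defensible.
def Pre_encontrar_tempo_minimo_minutos (tempos_ciclo : List Int) (num_alvo : Int) : Prop :=
  tempos_ciclo ≠ [] ∧
    ((∀ c ∈ tempos_ciclo, 1 ≤ c) ∨ (num_alvo ≤ 0 ∧ ∃ c ∈ tempos_ciclo, 0 ≤ c))
instance (tempos_ciclo : List Int) (num_alvo : Int) : Decidable (Pre_encontrar_tempo_minimo_minutos tempos_ciclo num_alvo) := by unfold Pre_encontrar_tempo_minimo_minutos; infer_instance

def pvWitness_encontrar_tempo_minimo_minutos : List Int × Int := ([2, 3], 4)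

def Spec_encontrar_tempo_minimo_minutos (tempos_ciclo : List Int) (num_alvo : Int) (out : Int) : Prop := out = encontrar_tempo_minimo_minutos_alt tempos_ciclo num_alvo
instance (tempos_ciclo : List Int) (num_alvo : Int) (out : Int) : Decidable (Spec_encontrar_tempo_minimo_minutos tempos_ciclo num_alvo out) := by unfold Spec_encontrar_tempo_minimo_minutos; infer_instance

-- ===== CLAIM (what is proved, stated in full; the proofs are below) =====
def Claim_equal_encontrar_tempo_minimo_minutos : Prop := ∀ (tempos_ciclo : List Int) (num_alvo : Int), Dom_encontrar_tempo_minimo_minutos tempos_ciclo num_alvo → Pre_encontrar_tempo_minimo_minutos tempos_ciclo num_alvo → Spec_encontrar_tempo_minimo_minutos tempos_ciclo num_alvo (encontrar_tempo_minimo_minutos tempos_ciclo num_alvo)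

-- ===== LEMMAS AND PROOFS =====

-- the count as a sum of per-cycle floors
theorem pvContar_eq_sum (tempos : List Int) (t : Int) :
    pvContar tempos t = (tempos.map (fun c => PySem.Int.floordiv t c)).sum := by
  unfold pvContar
  rw [PySem.List.foldl_add]
  simp

theorem pvContar_mono (tempos : List Int) (hpos : ∀ c ∈ tempos, 1 ≤ c)
    {s t : Int} (hst : s ≤ t) : pvContar tempos s ≤ pvContar tempos t := by
  rw [pvContar_eq_sum, pvContar_eq_sum]
  apply List.sum_le_sum
  intro c hc
  have h1 := hpos c hc
  rw [PySem.Int.floordiv_eq_ediv_of_pos (by omega), PySem.Int.floordiv_eq_ediv_of_pos (by omega)]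
  exact Int.ediv_le_ediv (by omega) hst

theorem pvContar_nonpos (tempos : List Int) (hpos : ∀ c ∈ tempos, 1 ≤ c)
    {t : Int} (ht : t ≤ 0) : pvContar tempos t ≤ 0 := by
  rw [pvContar_eq_sum]
  have h : (tempos.map (fun c => PySem.Int.floordiv t c)).sum ≤ (tempos.map (fun _ => (0 : Int))).sum := by
    apply List.sum_le_sum
    intro c hc
    have h1 := hpos c hc
    rw [PySem.Int.floordiv_eq_ediv_of_pos (by omega)]
    exact Int.ediv_nonpos_of_nonpos_of_neg ht (by omega)
  simpa using h

-- the element max(tempos) is in the list and bounds it, once the list is nonempty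
theorem pvMax_spec (tempos : List Int) (hne : tempos ≠ []) :
    (PySem.List.max? tempos (fun x => x)).getD 0 ∈ tempos ∧
      ∀ y ∈ tempos, y ≤ (PySem.List.max? tempos (fun x => x)).getD 0 := by
  cases h : PySem.List.max? tempos (fun x => x) with
  | none =>
    rw [PySem.List.max?_eq_none_iff] at h
    exact absurd h hne
  | some m =>
    simp only [Option.getD_some]
    exact ⟨PySem.List.max?_mem h, fun y hy => PySem.List.max?_isMax h y hy⟩

-- enough is produced at time num_alvo * max
theorem pvContar_upper (tempos : List Int) (hne : tempos ≠ []) (hpos : ∀ c ∈ tempos, 1 ≤ c)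
    {n : Int} (hn : 1 ≤ n) :
    n ≤ pvContar tempos (n * (PySem.List.max? tempos (fun x => x)).getD 0) := by
  obtain ⟨hmem, hmax⟩ := pvMax_spec tempos hne
  set M := (PySem.List.max? tempos (fun x => x)).getD 0 with hM
  have hM1 : 1 ≤ M := hpos M hmem
  rw [pvContar_eq_sum]
  have hfM : PySem.Int.floordiv (n * M) M = n := by
    rw [PySem.Int.floordiv_eq_ediv_of_pos (by omega)]
    exact Int.mul_ediv_cancel n (by omega)
  calc n = PySem.Int.floordiv (n * M) M := hfM.symm
    _ ≤ _ := by
        apply List.single_le_sum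
        · intro x hx
          obtain ⟨c, hc, rfl⟩ := List.mem_map.mp hx
          have h1 := hpos c hc
          rw [PySem.Int.floordiv_eq_ediv_of_pos (by omega)]
          exact Int.ediv_nonneg (by positivity) (by omega)
        · exact List.mem_map_of_mem hmem

-- A's binary search returns the least time at which the target is met
theorem pvLoopA_least (tempos : List Int) (hpos : ∀ c ∈ tempos, 1 ≤ c) (n lo hi best : Int) :
    (∀ T, T < lo → pvContar tempos T < n) →
    n ≤ pvContar tempos best →
    (∀ T, hi < T → n ≤ pvContar tempos T → best ≤ T) →
    n ≤ pvContar tempos (pvLoopA tempos n lo hi best) ∧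
      ∀ T, n ≤ pvContar tempos T → pvLoopA tempos n lo hi best ≤ T := by
  fun_induction pvLoopA tempos n lo hi best with
  | case1 lo hi best h mid hc IH =>
    intro hlo hbest hhi
    have hmb := PySem.Int.floordiv_two_mid_bounds h
    apply IH hlo hc
    intro T hT hPT
    omega
  | case2 lo hi best h mid hc IH =>
    intro hlo hbest hhi
    have hmb := PySem.Int.floordiv_two_mid_bounds h
    apply IH _ hbest hhi
    intro T hT
    by_cases hTlo : T < lo
    · exact hlo T hTlo
    · have : pvContar tempos T ≤ pvContar tempos mid := pvContar_mono tempos hpos (by omega)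
      omega
  | case3 lo hi best h =>
    intro hlo hbest hhi
    refine ⟨hbest, fun T hT => ?_⟩
    by_cases hThi : hi < T
    · exact hhi T hThi hT
    · exact absurd hT (by have := hlo T (by omega); omega)

-- the next completion time is above t, below each (t//c+1)*c, and attained by some cycle
theorem pvNext_spec (tempos : List Int) (hne : tempos ≠ []) (hpos : ∀ c ∈ tempos, 1 ≤ c) (t : Int) :
    t < pvNext tempos t ∧
      (∀ c ∈ tempos, pvNext tempos t ≤ (PySem.Int.floordiv t c + 1) * c) ∧
      ∃ c ∈ tempos, pvNext tempos t = (PySem.Int.floordiv t c + 1) * c := by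
  unfold pvNext
  cases h : PySem.List.min? (tempos.map (fun c => (PySem.Int.floordiv t c + 1) * c)) (fun x => x) with
  | none =>
    rw [PySem.List.min?_eq_none_iff] at h
    exact absurd (List.map_eq_nil_iff.mp h) hne
  | some m =>
    simp only [Option.getD_some]
    obtain ⟨c, hc, hm⟩ := List.mem_map.mp (PySem.List.min?_mem h)
    refine ⟨?_, ?_, ⟨c, hc, hm.symm⟩⟩
    · rw [← hm]
      have h1 := hpos c hc
      exact ((PySem.Int.floordiv_eq_iff_of_pos (by omega)).mp rfl).2
    · intro c' hc'
      exact PySem.List.min?_isMin h _ (List.mem_map_of_mem hc')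

-- the count is constant on [t, pvNext t)
theorem pvContar_const (tempos : List Int) (hne : tempos ≠ []) (hpos : ∀ c ∈ tempos, 1 ≤ c)
    {t u : Int} (htu : t ≤ u) (hu : u < pvNext tempos t) :
    pvContar tempos u = pvContar tempos t := by
  obtain ⟨_, hub, _⟩ := pvNext_spec tempos hne hpos t
  rw [pvContar_eq_sum, pvContar_eq_sum]
  congr 1
  apply List.map_eq_map_iff.mpr
  intro c hc
  have h1 := hpos c hc
  have hle : PySem.Int.floordiv t c ≤ PySem.Int.floordiv u c := by
    rw [PySem.Int.floordiv_eq_ediv_of_pos (by omega), PySem.Int.floordiv_eq_ediv_of_pos (by omega)]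
    exact Int.ediv_le_ediv (by omega) htu
  have hlt : PySem.Int.floordiv u c < PySem.Int.floordiv t c + 1 := by
    rw [PySem.Int.floordiv_lt_iff_lt_mul (by omega)]
    exact lt_of_lt_of_le hu (hub c hc)
  omega

-- the count strictly increases at pvNext t
theorem pvContar_next_lt (tempos : List Int) (hne : tempos ≠ []) (hpos : ∀ c ∈ tempos, 1 ≤ c)
    (t : Int) : pvContar tempos t < pvContar tempos (pvNext tempos t) := by
  obtain ⟨hgt, _, ⟨c, hc, hcm⟩⟩ := pvNext_spec tempos hne hpos t
  rw [pvContar_eq_sum, pvContar_eq_sum]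
  apply List.sum_lt_sum
  · intro i hi
    have h1 := hpos i hi
    rw [PySem.Int.floordiv_eq_ediv_of_pos (by omega), PySem.Int.floordiv_eq_ediv_of_pos (by omega)]
    exact Int.ediv_le_ediv (by omega) (by omega)
  · refine ⟨c, hc, ?_⟩
    have h1 := hpos c hc
    have : PySem.Int.floordiv (pvNext tempos t) c = PySem.Int.floordiv t c + 1 := by
      rw [hcm, PySem.Int.floordiv_eq_ediv_of_pos (by omega)]
      exact Int.mul_ediv_cancel _ (by omega)
    omega

-- B's walk returns the least time at which the target is met, from any lower bound
theorem pvLoopB_least (tempos : List Int) (hne : tempos ≠ []) (hpos : ∀ c ∈ tempos, 1 ≤ c)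
    (n t : Int) :
    (∀ s, n ≤ pvContar tempos s → t ≤ s) →
      n ≤ pvContar tempos (pvLoopB tempos n t) ∧
        ∀ s, n ≤ pvContar tempos s → pvLoopB tempos n t ≤ s := by
  fun_induction pvLoopB tempos n t with
  | case1 t hlt h IH =>
    intro hlow
    apply IH
    intro s hs
    have hts : t ≤ s := hlow s hs
    rcases le_or_gt (pvNext tempos t) s with hge | hlt2
    · exact hge
    · have := pvContar_const tempos hne hpos hts hlt2
      omega
  | case2 t hlt h =>
    exact absurd (pvContar_next_lt tempos hne hpos t) h
  | case3 t hlt =>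
    intro hlow
    exact ⟨by omega, hlow⟩

-- B's arithmetic estimate is a lower bound on every time meeting the target
theorem pvEstimate_lower (tempos : List Int) (hne : tempos ≠ []) (hpos : ∀ c ∈ tempos, 1 ≤ c)
    {n : Int} :
    ∀ s, n ≤ pvContar tempos s →
      PySem.Int.floordiv (n * (tempos.foldl (fun acc c => acc * c) 1))
        (pvContar tempos (tempos.foldl (fun acc c => acc * c) 1)) ≤ s := by
  intro s hs
  have hprod : tempos.foldl (fun acc c => acc * c) 1 = tempos.prod := by
    rw [List.prod_eq_foldl]
  rw [hprod]
  set L := tempos.prod with hLdef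
  have hL1 : 1 ≤ L := List.one_le_prod hpos
  have hdvd : ∀ c ∈ tempos, c ∣ L := fun c hc => List.dvd_prod hc
  have hterm : ∀ c ∈ tempos, 1 ≤ PySem.Int.floordiv L c := by
    intro c hc
    have h1 := hpos c hc
    rw [PySem.Int.le_floordiv_iff_mul_le (by omega)]
    simpa using Int.le_of_dvd (by omega) (hdvd c hc)
  set W := pvContar tempos L with hWdef
  have hW1 : 1 ≤ W := by
    obtain ⟨c0, hc0⟩ := List.exists_mem_of_ne_nil tempos hne
    rw [hWdef, pvContar_eq_sum]
    calc (1 : Int) ≤ PySem.Int.floordiv L c0 := hterm c0 hc0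
      _ ≤ _ := by
          apply List.single_le_sum
          · intro x hx
            obtain ⟨c, hc, rfl⟩ := List.mem_map.mp hx
            have := hterm c hc
            omega
          · exact List.mem_map_of_mem hc0
  have hkey : pvContar tempos s * L ≤ s * W := by
    rw [hWdef, pvContar_eq_sum, pvContar_eq_sum, ← List.sum_map_mul_right, ← List.sum_map_mul_left]
    apply List.sum_le_sum
    intro c hc
    have h1 := hpos c hc
    have he : PySem.Int.floordiv L c * c = L := by
      rw [PySem.Int.floordiv_eq_ediv_of_pos (by omega)]
      exact Int.ediv_mul_cancel (hdvd c hc)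
    have hsc : PySem.Int.floordiv s c * c ≤ s := by
      rw [PySem.Int.floordiv_eq_ediv_of_pos (by omega)]
      exact Int.ediv_mul_le s (by omega)
    calc PySem.Int.floordiv s c * L = PySem.Int.floordiv s c * (PySem.Int.floordiv L c * c) := by
          rw [he]
      _ = (PySem.Int.floordiv s c * c) * PySem.Int.floordiv L c := by ring
      _ ≤ s * PySem.Int.floordiv L c := by
          apply mul_le_mul_of_nonneg_right hsc
          have := hterm c hc
          omega
  have hnL : n * L ≤ s * W := by
    have : n * L ≤ pvContar tempos s * L := by
      apply mul_le_mul_of_nonneg_right hs (by omega)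
    omega
  rw [PySem.Int.floordiv_eq_ediv_of_pos (by omega)]
  calc n * L / W ≤ s * W / W := Int.ediv_le_ediv (by omega) hnL
    _ = s := Int.mul_ediv_cancel s (by omega)

-- A returns its never-updated initial bound num_alvo * max whenever num_alvo ≤ 0 (and max ≥ 0)
theorem pvA_nonpos (tempos : List Int) (_hne : tempos ≠ []) {n : Int} (hn : n ≤ 0)
    (hM : 0 ≤ (PySem.List.max? tempos (fun x => x)).getD 0) :
    encontrar_tempo_minimo_minutos tempos n
      = n * (PySem.List.max? tempos (fun x => x)).getD 0 := by
  unfold encontrar_tempo_minimo_minutos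
  rw [pvLoopA, dif_neg (by nlinarith)]

-- ===== VERDICT (by name: the statement is the Claim_ definition above) =====
theorem encontrar_tempo_minimo_minutos_spec : Claim_equal_encontrar_tempo_minimo_minutos := by
  intro tempos n _ hPre
  obtain ⟨hne, hrest⟩ := hPre
  unfold Spec_encontrar_tempo_minimo_minutos encontrar_tempo_minimo_minutos_alt
  obtain ⟨hmem, hmax⟩ := pvMax_spec tempos hne
  rcases hrest with hpos | ⟨hn0, c0, hc00, hc0nonneg⟩
  · by_cases hn : 0 < n
    · rw [if_pos hn]
      replace hn : 1 ≤ n := hn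
      simp only
      have hA := pvLoopA_least tempos hpos n 1
        (n * ((PySem.List.max? tempos (fun x => x)).getD 0))
        (n * ((PySem.List.max? tempos (fun x => x)).getD 0))
        (fun T hT => by
          have := pvContar_nonpos tempos hpos (t := T) (by omega)
          omega)
        (pvContar_upper tempos hne hpos hn)
        (fun T hT _ => by omega)
      have hB := pvLoopB_least tempos hne hpos n _
        (pvEstimate_lower tempos hne hpos)
      unfold encontrar_tempo_minimo_minutos
      exact le_antisymm (hA.2 _ hB.1) (hB.2 _ hA.1)
    · rw [if_neg hn,
        pvA_nonpos tempos hne (by omega) (by have := hpos _ hmem; omega)]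
  · rw [if_neg (by omega : ¬ 0 < n),
      pvA_nonpos tempos hne hn0 (le_trans hc0nonneg (hmax c0 hc00))]
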